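-- pv_equiv track=rewrite | github.com/bramjohnson/advent-of-code | 2022/Day 3/day3.py | rucksack_common
-- ===== SOURCE A (Python) =====
-- def rucksack_common(rucksacks):
--     rucksack_sets = [set(x) for x in rucksacks] # list of sets
--
--     while(len(rucksack_sets) > 1):
--         first = rucksack_sets.pop()
--         second = rucksack_sets.pop()
--         rucksack_sets.append(first.intersection(second))
--
--     last_element = rucksack_sets[0]
--     if len(last_element) > 1:
--         raise ValueError("Too many elements, check for correct input (should only be 1).")
--
--     return list(last_element)[0]
-- ===== SOURCE B (Python) =====
-- def rucksack_common(rucksacks):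
--     rucksacks = list(rucksacks)
--     first, rest = rucksacks[0], rucksacks[1:]
--
--     seen = []
--     for ch in first:
--         if ch not in seen and all(ch in r for r in rest):
--             seen.append(ch)
--
--     if len(seen) > 1:
--         raise ValueError("Too many elements, check for correct input (should only be 1).")
--
--     return seen[0]
-- ===== Notes on version B (the rewrite author's own statement) =====
-- stated objective: simpler
-- what changed: Replaces A's repeated pop-two-sets-and-append-their-intersection reduction with a single filtered scan of the first rucksack, keeping each character that is new and occurs in every remaining rucksack.
import Mathlib
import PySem

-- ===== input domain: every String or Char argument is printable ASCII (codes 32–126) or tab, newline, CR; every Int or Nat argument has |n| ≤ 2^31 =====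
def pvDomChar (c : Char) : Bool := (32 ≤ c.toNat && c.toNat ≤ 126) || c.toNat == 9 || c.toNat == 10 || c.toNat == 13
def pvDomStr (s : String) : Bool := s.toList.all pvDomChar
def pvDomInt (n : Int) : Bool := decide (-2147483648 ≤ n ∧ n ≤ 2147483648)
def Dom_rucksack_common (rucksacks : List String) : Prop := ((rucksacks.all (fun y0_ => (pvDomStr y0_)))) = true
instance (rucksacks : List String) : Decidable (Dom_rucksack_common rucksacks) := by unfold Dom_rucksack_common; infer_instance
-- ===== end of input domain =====

-- B replaces A's pairwise pop-and-intersect reduction over sets by a single filtered scan of the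
-- first rucksack (objective: simpler, one pass, no intermediate sets).

-- ===== PORT A =====
-- the while loop: while len(sets) > 1: first = pop(); second = pop(); append(first ∩ second)
def rucksackLoopA (sets : List (PySem.Set Char)) : List (PySem.Set Char) :=
  if 1 < sets.length then
    match h1 : PySem.List.pop? sets with
    | none => sets                                   -- unreachable (len > 1)
    | some (first, rest1) =>
      match h2 : PySem.List.pop? rest1 with
      | none => sets                                 -- unreachable (len > 1)
      | some (second, rest2) =>
          rucksackLoopA (rest2 ++ [PySem.Set.inter first second])
  else sets
termination_by sets.length
decreasing_by
  have e1 := PySem.List.length_of_pop?_eq_some _ h1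
  have e2 := PySem.List.length_of_pop?_eq_some _ h2
  simp only [] at e1 e2
  simp only [List.length_append, List.length_singleton]
  omega

def rucksack_common (rucksacks : List String) : String :=
  let rucksack_sets := rucksacks.map (fun x => PySem.Set.ofList x.toList)
  let final := rucksackLoopA rucksack_sets
  match PySem.List.pyGet? final 0 with                -- rucksack_sets[0]
  | none => ""                                       -- IndexError (empty input): outside Pre_
  | some last_element =>
    if 1 < PySem.Set.len last_element then ""        -- raise ValueError: outside Pre_
    else
      match last_element with                        -- list(last_element)[0]
      | c :: _ => String.ofList [c]                      -- singleton under Pre_, so order-independent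
      | [] => ""                                     -- IndexError: outside Pre_

-- ===== PORT B =====
def rucksack_common_alt (rucksacks : List String) : String :=
  match PySem.List.pyGet? rucksacks 0 with            -- rucksacks[0]
  | none => ""                                       -- IndexError (empty input): outside Pre_
  | some first =>
    let rest := PySem.List.slice rucksacks (some 1) none   -- rucksacks[1:]
    let seen := first.toList.foldl
      (fun seen ch =>
        if !seen.contains ch && rest.all (fun r => PySem.Str.isIn (String.ofList [ch]) r)
        then seen ++ [ch] else seen) []
    if 1 < seen.length then ""                       -- raise ValueError: outside Pre_
    else
      match seen with                                -- seen[0]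
      | c :: _ => String.ofList [c]
      | [] => ""                                     -- IndexError: outside Pre_

-- ===== PRECONDITION & SPEC =====
-- the characters common to all rucksacks (spec-level; in order of first occurrence in the first one)
def pvCommons (rucksacks : List String) : List Char :=
  (PySem.List.dedup rucksacks.headI.toList).filter
    (fun c => rucksacks.all (fun r => r.toList.contains c))

-- Pre_ excludes exactly the inputs on which A raises: the empty list and lists of rucksacks with no
-- common character (IndexError) or more than one common character (ValueError).
def Pre_rucksack_common (rucksacks : List String) : Prop :=
  rucksacks ≠ [] ∧ (pvCommons rucksacks).length = 1

instance (rucksacks : List String) : Decidable (Pre_rucksack_common rucksacks) := by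
  unfold Pre_rucksack_common; infer_instance

def pvWitness_rucksack_common : List String := ["ab", "cb", "db"]

def Spec_rucksack_common (rucksacks : List String) (out : String) : Prop := out = rucksack_common_alt rucksacks
instance (rucksacks : List String) (out : String) : Decidable (Spec_rucksack_common rucksacks out) := by unfold Spec_rucksack_common; infer_instance

-- ===== CLAIM (what is proved, stated in full; the proofs are below) =====
def Claim_equal_rucksack_common : Prop := ∀ (rucksacks : List String), Dom_rucksack_common rucksacks → Pre_rucksack_common rucksacks → Spec_rucksack_common rucksacks (rucksack_common rucksacks)

-- ===== LEMMAS AND PROOFS =====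

-- a nodup list whose members are exactly c is [c]
lemma pv_eq_singleton {l : List Char} {c : Char} (hnd : l.Nodup)
    (hm : ∀ x, x ∈ l ↔ x = c) : l = [c] := by
  match l, hnd with
  | [], _ => exact absurd ((hm c).mpr rfl) (List.not_mem_nil)
  | [x], _ =>
    have hx : x = c := (hm x).mp (by simp)
    rw [hx]
  | x :: y :: t, hnd =>
    have hx : x = c := (hm x).mp (by simp)
    have hy : y = c := (hm y).mp (by simp)
    simp [hx, hy] at hnd

-- one iteration of A's while loop intersects the last two sets
lemma loopA_step (ys : List (PySem.Set Char)) (b a : PySem.Set Char) :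
    rucksackLoopA (ys ++ [b, a]) = rucksackLoopA (ys ++ [PySem.Set.inter a b]) := by
  have hre : ys ++ [b, a] = (ys ++ [b]) ++ [a] := by simp
  rw [rucksackLoopA, if_pos (by simp)]
  rw [hre, PySem.List.pop?_last]
  split
  · next h2 => cases h2
  · next first rest1 h2 =>
    simp only [Option.some.injEq, Prod.mk.injEq] at h2
    obtain ⟨rfl, rfl⟩ := h2
    rw [PySem.List.pop?_last]

lemma loopA_spec : ∀ (n : ℕ), ∀ (ss : List (PySem.Set Char)), ss.length = n → ss ≠ [] →
    (∀ s ∈ ss, List.Nodup s) →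
    ∃ t, rucksackLoopA ss = [t] ∧ List.Nodup t ∧ ∀ x, (x ∈ t ↔ ∀ s ∈ ss, x ∈ s) := by
  intro n
  induction n using Nat.strong_induction_on with
  | _ n ih =>
    intro ss hlen hne hnd
    by_cases hbig : 1 < ss.length
    · obtain ⟨ys, b, a, rfl⟩ : ∃ ys b a, ss = ys ++ [b, a] := by
        rcases h : ss.reverse with _ | ⟨a, rest⟩
        · simp [List.reverse_eq_nil_iff] at h; exact absurd h hne
        · rcases rest with _ | ⟨b, t⟩
          · have := congrArg List.length h
            simp at this; omega
          · refine ⟨t.reverse, b, a, ?_⟩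
            have := congrArg List.reverse h
            simpa using this
      rw [loopA_step]
      have hlen2 : (ys ++ [PySem.Set.inter a b]).length = n - 1 := by
        simp at hlen ⊢; omega
      have hnd2 : ∀ s ∈ ys ++ [PySem.Set.inter a b], List.Nodup s := by
        intro s hs
        rcases List.mem_append.mp hs with hs | hs
        · exact hnd s (by simp [hs])
        · have : s = PySem.Set.inter a b := by simpa using hs
          subst this
          exact List.Nodup.filter _ (hnd a (by simp))
      obtain ⟨t, ht, htnd, htm⟩ := ih (n - 1) (by omega) _ hlen2 (by simp) hnd2
      refine ⟨t, ht, htnd, fun x => ?_⟩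
      rw [htm x]
      simp only [List.mem_append, List.mem_cons]
      constructor
      · intro h s hs
        rcases hs with hs | hs | hs
        · exact h s (Or.inl hs)
        · have := h _ (Or.inr (Or.inl rfl))
          simp only [PySem.Set.inter, List.mem_filter] at this
          subst hs
          simpa using this.2
        · simp at hs; subst hs
          have := h _ (Or.inr (Or.inl rfl))
          simp only [PySem.Set.inter, List.mem_filter] at this
          exact this.1
      · intro h s hs
        rcases hs with hs | hs
        · exact h s (Or.inl hs)
        · simp at hs; subst hs
          simp only [PySem.Set.inter, List.mem_filter]
          refine ⟨h a (by simp), by simpa using h b (by simp)⟩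
    · rcases ss with _ | ⟨t, rest⟩
      · exact absurd rfl hne
      · rcases rest with _ | ⟨u, rest⟩
        · refine ⟨t, ?_, hnd t (by simp), fun x => by simp⟩
          rw [rucksackLoopA]
          simp
        · simp at hbig

-- characterization of B's fold
lemma foldB_spec (p : Char → Bool) : ∀ (cs : List Char) (acc : List Char), acc.Nodup →
    (cs.foldl (fun seen ch => if !seen.contains ch && p ch then seen ++ [ch] else seen) acc).Nodup ∧
    ∀ x, x ∈ cs.foldl (fun seen ch => if !seen.contains ch && p ch then seen ++ [ch] else seen) acc ↔
      x ∈ acc ∨ (x ∈ cs ∧ p x) := by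
  intro cs
  induction cs with
  | nil => intro acc h; exact ⟨h, fun x => by simp⟩
  | cons ch cs ih =>
    intro acc hacc
    simp only [List.foldl_cons]
    by_cases hc : (!acc.contains ch && p ch) = true
    · rw [if_pos hc]
      simp only [Bool.and_eq_true, Bool.not_eq_true', List.contains_eq_mem, decide_eq_false_iff_not] at hc
      obtain ⟨hch, hp⟩ := hc
      have hacc' : (acc ++ [ch]).Nodup := by
        simp only [List.nodup_append, List.nodup_singleton, true_and]
        exact ⟨hacc, fun a ha b hb => by simp at hb; subst hb; exact fun h => hch (h ▸ ha)⟩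
      obtain ⟨h1, h2⟩ := ih (acc ++ [ch]) hacc'
      refine ⟨h1, fun x => ?_⟩
      rw [h2 x]
      simp only [List.mem_append, List.mem_cons, List.not_mem_nil, or_false]
      constructor
      · rintro ((hx | hx) | hx)
        · exact Or.inl hx
        · exact Or.inr ⟨Or.inl hx, hx ▸ hp⟩
        · exact Or.inr ⟨Or.inr hx.1, hx.2⟩
      · rintro (hx | ⟨hx | hx, hpx⟩)
        · exact Or.inl (Or.inl hx)
        · exact Or.inl (Or.inr hx)
        · exact Or.inr ⟨hx, hpx⟩
    · rw [if_neg hc]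
      simp only [Bool.and_eq_true, Bool.not_eq_true', List.contains_eq_mem, decide_eq_false_iff_not,
        not_and] at hc
      obtain ⟨h1, h2⟩ := ih acc hacc
      refine ⟨h1, fun x => ?_⟩
      rw [h2 x]
      simp only [List.mem_cons]
      constructor
      · rintro (hx | hx)
        · exact Or.inl hx
        · exact Or.inr ⟨Or.inr hx.1, hx.2⟩
      · rintro (hx | ⟨hx | hx, hpx⟩)
        · exact Or.inl hx
        · subst hx
          by_cases hmem : x ∈ acc
          · exact Or.inl hmem
          · exact absurd hpx (hc hmem)
        · exact Or.inr ⟨hx, hpx⟩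

-- ===== VERDICT (by name: the statement is the Claim_ definition above) =====
-- x appears in every rucksack iff x is the unique common character
lemma pvP_iff (first : String) (rest : List String) (c : Char)
    (hc : pvCommons (first :: rest) = [c]) :
    ∀ x : Char, (∀ r ∈ first :: rest, x ∈ r.toList) ↔ x = c := by
  intro x
  have hmem : x ∈ pvCommons (first :: rest) ↔ (∀ r ∈ first :: rest, x ∈ r.toList) := by
    unfold pvCommons
    simp only [List.headI, List.mem_filter, PySem.List.mem_dedup, List.all_eq_true,
      List.contains_eq_mem, decide_eq_true_eq]
    exact ⟨fun h => h.2, fun h => ⟨h first (by simp), h⟩⟩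
  rw [hc, List.mem_singleton] at hmem
  exact hmem.symm

theorem rucksack_common_spec : Claim_equal_rucksack_common := by
  intro rucksacks _ hpre
  obtain ⟨hne, hlen⟩ := hpre
  obtain ⟨first, rest, rfl⟩ : ∃ f r, rucksacks = f :: r := by
    cases rucksacks with
    | nil => exact absurd rfl hne
    | cons f r => exact ⟨f, r, rfl⟩
  obtain ⟨c, hc⟩ := List.length_eq_one_iff.mp hlen
  have hP := pvP_iff first rest c hc
  -- A's side returns String.ofList [c]
  have hA : rucksack_common (first :: rest) = String.ofList [c] := by
    have hsets_nd : ∀ s ∈ (first :: rest).map (fun x => PySem.Set.ofList x.toList),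
        List.Nodup s := by
      intro s hs
      obtain ⟨r, _, rfl⟩ := List.mem_map.mp hs
      exact PySem.Set.nodup_ofList _
    obtain ⟨t, ht, htnd, htm⟩ := loopA_spec _ _ rfl (by simp) hsets_nd
    have ht1 : t = [c] := by
      refine pv_eq_singleton htnd (fun x => ?_)
      rw [htm x]
      constructor
      · intro h
        refine (hP x).mp (fun r hr => ?_)
        have := h _ (List.mem_map_of_mem hr)
        rwa [PySem.Set.mem_ofList] at this
      · intro hx s hs
        obtain ⟨r, hr, rfl⟩ := List.mem_map.mp hs
        rw [PySem.Set.mem_ofList]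
        exact (hP x).mpr hx r hr
    rw [ht1] at ht
    simp only [rucksack_common, ht]
    simp [PySem.List.pyGet?, PySem.List.pyIdx?, PySem.Set.len]
  -- B's side returns String.ofList [c]
  have hB : rucksack_common_alt (first :: rest) = String.ofList [c] := by
    have hget : PySem.List.pyGet? (first :: rest) 0 = some first := by
      simp [PySem.List.pyGet?, PySem.List.pyIdx?]
    have hp : ∀ x : Char,
        (rest.all (fun r => PySem.Str.isIn (String.ofList [x]) r)) = true ↔
        ∀ r ∈ rest, x ∈ r.toList := by
      intro x
      simp only [List.all_eq_true]
      refine forall₂_congr (fun r _ => ?_)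
      rw [PySem.Str.isIn_iff_infix]
      simp [List.singleton_infix_iff]
    obtain ⟨hnd, hm⟩ := foldB_spec (fun ch => rest.all (fun r => PySem.Str.isIn (String.ofList [ch]) r))
      first.toList [] List.nodup_nil
    have hseen : first.toList.foldl
        (fun seen ch => if !seen.contains ch && rest.all (fun r => PySem.Str.isIn (String.ofList [ch]) r)
          then seen ++ [ch] else seen) [] = [c] := by
      refine pv_eq_singleton hnd (fun x => ?_)
      rw [hm x]
      simp only [List.not_mem_nil, false_or]
      rw [hp x]
      rw [← hP x]
      constructor
      · rintro ⟨h1, h2⟩ r hr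
        rcases List.mem_cons.mp hr with rfl | hr
        · exact h1
        · exact h2 r hr
      · intro h
        exact ⟨h first (by simp), fun r hr => h r (by simp [hr])⟩
    simp only [rucksack_common_alt, hget]
    simp only [PySem.List.slice_from_one, List.tail_cons]
    rw [hseen]
    simp
  unfold Spec_rucksack_common
  rw [hA, hB]
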